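-- pv_equiv track=rewrite | github.com/DarKoul-Wmg/AMS-AWS-1 | MP03 Programación/UF2_Python dineño modular/Ejercicios/PT25_recursividad2/ex_clase_jordi.py | elementocomun
-- ===== SOURCE A (Python) =====
-- def elementocomun(string1,string2):
--     resultado = ""
--
--     if len(string1) == 0:
--         return resultado
--
--     else:
--         resultado += elementocomun(string1[1:],string2)
--         if string1[0] in string2:
--             if string1[0] not in resultado:
--                 resultado += string1[0]
--         return resultado
-- ===== SOURCE B (Python) =====
-- def elementocomun(string1, string2):
--     acc = ""
--     for c in string1:
--         if c in string2:
--             acc = acc.replace(c, "") + c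
--     return acc[::-1]
-- ===== Notes on version B (the rewrite author's own statement) =====
-- stated objective: faster
-- what changed: Replaces the suffix recursion (which slices string1 at every level and re-checks membership in the growing result) by a single forward loop keeping each matching character's last occurrence (move-to-end) and one final reversal.
import Mathlib
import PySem

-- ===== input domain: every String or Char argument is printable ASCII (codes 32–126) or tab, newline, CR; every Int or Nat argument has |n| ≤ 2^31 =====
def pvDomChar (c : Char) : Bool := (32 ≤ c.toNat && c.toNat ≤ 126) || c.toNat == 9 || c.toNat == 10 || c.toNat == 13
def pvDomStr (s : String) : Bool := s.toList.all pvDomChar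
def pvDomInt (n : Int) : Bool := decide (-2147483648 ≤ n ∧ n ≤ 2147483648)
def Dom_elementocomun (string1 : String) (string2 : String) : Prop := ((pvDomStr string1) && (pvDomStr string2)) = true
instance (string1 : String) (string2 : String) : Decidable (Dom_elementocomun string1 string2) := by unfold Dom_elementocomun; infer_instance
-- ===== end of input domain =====

-- B replaces A's suffix recursion (which re-checks membership in the already built result)
-- by one forward move-to-end loop reversed at the end; alternative decomposition, same cost class.

-- ===== PORT A =====
-- A recurses on string1[1:]; 'x in s' on a single character is char membership, ported on List Char.
def elemAList (s1 : List Char) (s2 : List Char) : List Char :=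
  match s1 with
  | [] => []
  | c :: rest =>
      let resultado := elemAList rest s2
      if c ∈ s2 then
        (if c ∈ resultado then resultado else resultado ++ [c])
      else resultado

def elementocomun (string1 : String) (string2 : String) : String :=
  String.ofList (elemAList string1.toList string2.toList)

-- ===== PORT B =====
-- Source B: acc = acc.replace(c, "") + c  (replace of a single char = filter), then acc[::-1].
def elemBStep (s2 : List Char) (acc : List Char) (c : Char) : List Char :=
  if c ∈ s2 then (acc.filter (fun x => x ≠ c)) ++ [c] else acc

def elementocomun_alt (string1 : String) (string2 : String) : String :=
  String.ofList ((string1.toList.foldl (elemBStep string2.toList) []).reverse)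

-- ===== PRECONDITION & SPEC =====
def Spec_elementocomun (string1 : String) (string2 : String) (out : String) : Prop := out = elementocomun_alt string1 string2
instance (string1 : String) (string2 : String) (out : String) : Decidable (Spec_elementocomun string1 string2 out) := by unfold Spec_elementocomun; infer_instance

-- ===== CLAIM (what is proved, stated in full; the proofs are below) =====
def Claim_equal_elementocomun : Prop := ∀ (string1 : String) (string2 : String), Dom_elementocomun string1 string2 → Spec_elementocomun string1 string2 (elementocomun string1 string2)

-- ===== LEMMAS AND PROOFS =====

-- A's step, as a foldl step (arguments flipped from the foldr view of the recursion).
def elemAStep (s2 : List Char) (r : List Char) (c : Char) : List Char :=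
  if c ∈ s2 then (if c ∈ r then r else r ++ [c]) else r

-- keep-first dedup of the chars of m that lie in s2, as a foldr
def keepFirst (s2 : List Char) (m : List Char) : List Char :=
  m.foldr (fun c r => if c ∈ s2 then c :: r.filter (fun x => x ≠ c) else r) []

theorem elemA_eq_foldl (s2 l : List Char) :
    elemAList l s2 = l.reverse.foldl (elemAStep s2) [] := by
  induction l with
  | nil => simp [elemAList]
  | cons c rest ih =>
      simp [elemAList, ih, List.foldl_append, elemAStep]

theorem keepFirst_reverse (s2 m : List Char) :
    (keepFirst s2 m).reverse = m.foldr (fun c acc => elemBStep s2 acc c) [] := by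
  induction m with
  | nil => simp [keepFirst]
  | cons c rest ih =>
      simp only [keepFirst, List.foldr_cons] at ih ⊢
      by_cases hc : c ∈ s2
      · rw [if_pos hc, List.reverse_cons, ← List.filter_reverse, ih]
        simp [elemBStep, hc]
      · rw [if_neg hc, ih]
        simp [elemBStep, hc]

theorem foldl_elemA (s2 : List Char) (m : List Char) :
    ∀ (a : List Char),
      m.foldl (elemAStep s2) a = a ++ (keepFirst s2 m).filter (fun x => x ∉ a) := by
  induction m with
  | nil => intro a; simp [keepFirst]
  | cons c rest ih =>
      intro a
      have hK : keepFirst s2 (c :: rest)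
          = if c ∈ s2 then c :: (keepFirst s2 rest).filter (fun x => x ≠ c)
            else keepFirst s2 rest := by
        simp [keepFirst]
      rw [List.foldl_cons, ih, hK]
      unfold elemAStep
      by_cases hs : c ∈ s2
      · rw [if_pos hs, if_pos hs]
        by_cases ha : c ∈ a
        · rw [if_pos ha]
          congr 1
          rw [List.filter_cons_of_neg (by simp [ha]), List.filter_filter]
          apply List.filter_congr
          intro x _
          by_cases hx : x ∈ a
          · simp [hx]
          · have hxc : x ≠ c := fun h => hx (h ▸ ha)
            simp [hx, hxc]
        · rw [if_neg ha]
          rw [List.filter_cons_of_pos (by simp [ha]), List.filter_filter,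
            List.append_assoc]
          congr 1
          simp only [List.singleton_append]
          congr 1
          apply List.filter_congr
          intro x _
          by_cases h1 : x = c
          · simp [h1, List.mem_append]
          · by_cases h2 : x ∈ a <;> simp [h1, h2, List.mem_append]
      · rw [if_neg hs, if_neg hs]

theorem elemA_eq_B (s2 l : List Char) :
    elemAList l s2 = (l.foldl (elemBStep s2) []).reverse := by
  have h1 : elemAList l s2 = keepFirst s2 l.reverse := by
    rw [elemA_eq_foldl]
    simpa using foldl_elemA s2 l.reverse []
  have h2 : l.foldl (elemBStep s2) []
      = l.reverse.foldr (fun c acc => elemBStep s2 acc c) [] := by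
    rw [← List.foldl_reverse]; simp
  rw [h1, h2, ← keepFirst_reverse, List.reverse_reverse]

-- ===== VERDICT (by name: the statement is the Claim_ definition above) =====
theorem elementocomun_spec : Claim_equal_elementocomun := by
  intro s1 s2 _
  unfold Spec_elementocomun elementocomun elementocomun_alt
  rw [elemA_eq_B]
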